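-- pv_equiv track=rewrite | github.com/BrenerCantuaria/event-driven-app | apps/stream/mqtt/mqtt_client.py | _topic_matches
-- ===== SOURCE A (Python) =====
-- def _topic_matches(pattern: str, topic: str) -> bool:
--     """Implementação correta de match MQTT com wildcards"""
--     pattern_parts = pattern.split("/")
--     topic_parts = topic.split("/")
--
--     for i in range(max(len(pattern_parts), len(topic_parts))):
--         if i >= len(pattern_parts):
--             return False
--         if i >= len(topic_parts):
--             return pattern_parts[i] == "#"
--
--         if pattern_parts[i] == "#":
--             return True
--         if pattern_parts[i] == "+":
--             continue
--         if pattern_parts[i] != topic_parts[i]: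
--             return False
--
--     return True
-- ===== SOURCE B (Python) =====
-- def _topic_matches(pattern: str, topic: str) -> bool:
--     """Char-level scan: walks pattern and topic in lockstep without splitting."""
--     P, T = len(pattern), len(topic)
--     i = j = 0  # i, j always sit at the start of a segment
--     while True:
--         # wildcard '#' as a full segment: matches everything from here on
--         if i < P and pattern[i] == '#' and (i + 1 == P or pattern[i + 1] == '/'):
--             return True
--         # wildcard '+' as a full segment: skip exactly one topic segment
--         if i < P and pattern[i] == '+' and (i + 1 == P or pattern[i + 1] == '/'):
--             k = topic.find('/', j)
--             if i + 1 == P: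
--                 return k == -1
--             if k == -1:
--                 # topic exhausted while pattern continues: only '#' may remain
--                 i += 2
--                 return i < P and pattern[i] == '#' and (i + 1 == P or pattern[i + 1] == '/')
--             i += 2
--             j = k + 1
--             continue
--         # literal segment: compare character by character
--         while True:
--             pc = pattern[i] if i < P else None
--             tc = topic[j] if j < T else None
--             if pc is None and tc is None:
--                 return True
--             if pc == '/' and tc == '/':
--                 i += 1
--                 j += 1
--                 break  # both move to the next segment
--             if pc == '/' and tc is None:
--                 # topic exhausted while pattern continues: only '#' may remain
--                 i += 1
--                 return i < P and pattern[i] == '#' and (i + 1 == P or pattern[i + 1] == '/')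
--             if pc != tc:
--                 return False
--             i += 1
--             j += 1
-- ===== Notes on version B (the rewrite author's own statement) =====
-- stated objective: alternative
-- what changed: Replaces A's split-both-strings-then-index-loop over segment lists by a character-level lockstep scan of the two strings (a small state machine with wildcard checks only at segment starts) that never builds the segment lists.
import Mathlib
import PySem

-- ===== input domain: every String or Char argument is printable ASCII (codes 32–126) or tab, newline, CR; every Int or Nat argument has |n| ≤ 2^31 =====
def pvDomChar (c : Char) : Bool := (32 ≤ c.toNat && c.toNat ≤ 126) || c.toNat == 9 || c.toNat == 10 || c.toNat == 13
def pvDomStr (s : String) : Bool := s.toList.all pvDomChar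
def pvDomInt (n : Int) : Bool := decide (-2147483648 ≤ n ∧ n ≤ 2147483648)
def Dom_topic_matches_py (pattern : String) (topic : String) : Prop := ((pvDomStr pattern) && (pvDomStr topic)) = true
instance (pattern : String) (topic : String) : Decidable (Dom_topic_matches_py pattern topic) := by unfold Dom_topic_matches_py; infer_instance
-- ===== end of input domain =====

-- B replaces A's split-into-segments-then-index loop by a character-level lockstep scan of the two
-- strings that never builds the segment lists (objective: alternative); same results on all inputs.

-- ===== PORT A =====
-- the 'for i in range(max(...))' loop of A, with its early returns, as recursion on the index
def topicLoopA (ps ts : List String) (n i : Nat) : Bool :=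
  if i < n then
    if ps.length ≤ i then false
    else if ts.length ≤ i then ps.getD i "" == "#"
    else if ps.getD i "" == "#" then true
    else if ps.getD i "" == "+" then topicLoopA ps ts n (i + 1)
    else if ps.getD i "" != ts.getD i "" then false
    else topicLoopA ps ts n (i + 1)
  else true
termination_by n - i

def topic_matches_py (pattern : String) (topic : String) : Bool :=
  let pattern_parts := (PySem.Str.split? pattern "/").getD []
  let topic_parts := (PySem.Str.split? topic "/").getD []
  topicLoopA pattern_parts topic_parts (max pattern_parts.length topic_parts.length) 0

-- ===== PORT B =====
-- Source B's check "pattern[i] == c and (i+1 == P or pattern[i+1] == '/')": the string at position p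
-- starts with the one-char segment c
def headIsSeg (p : List Char) (c : Char) : Bool :=
  match p with
  | x :: rest => x == c && (rest.isEmpty || rest.head? == some '/')
  | [] => false

-- Source B's two nested while loops over the char positions i, j, as recursion on the remaining chars;
-- atStart = true ↔ the outer loop head (both positions at a segment start); topic.find('/', j) is
-- the dropWhile on the remaining topic chars
def mB (atStart : Bool) (p t : List Char) : Bool :=
  if atStart && headIsSeg p '#' then true
  else if atStart && headIsSeg p '+' then
    let t' := t.dropWhile (fun c => !(c == '/'))
    match p with
    | [_] => t'.isEmpty
    | _ :: _ :: p' => if t'.isEmpty then headIsSeg p' '#' else mB true p' t'.tail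
    | [] => false
  else
    match p, t with
    | [], [] => true
    | [], _ :: _ => false
    | pc :: ps, [] => if pc == '/' then headIsSeg ps '#' else false
    | pc :: ps, tc :: ts =>
      if pc == '/' && tc == '/' then mB true ps ts
      else if pc == tc then mB false ps ts
      else false
termination_by p.length + t.length
decreasing_by
  · have hle := List.length_dropWhile_le (fun c => !(c == '/')) t
    have htl : (t.dropWhile (fun c => !(c == '/'))).tail.length ≤ (t.dropWhile (fun c => !(c == '/'))).length := by
      simp [List.length_tail]
    simp at hle htl ⊢
    omega
  · simp
    omega
  · simp
    omega

def topic_matches_py_alt (pattern : String) (topic : String) : Bool :=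
  mB true pattern.toList topic.toList

-- ===== PRECONDITION & SPEC =====
def Spec_topic_matches_py (pattern : String) (topic : String) (out : Bool) : Prop := out = topic_matches_py_alt pattern topic
instance (pattern : String) (topic : String) (out : Bool) : Decidable (Spec_topic_matches_py pattern topic out) := by unfold Spec_topic_matches_py; infer_instance

-- ===== CLAIM (what is proved, stated in full; the proofs are below) =====
def Claim_equal_topic_matches_py : Prop := ∀ (pattern : String) (topic : String), Dom_topic_matches_py pattern topic → Spec_topic_matches_py pattern topic (topic_matches_py pattern topic)

-- ===== LEMMAS AND PROOFS =====

-- structural reference matcher: what A's loop computes on the not-yet-scanned segment suffixes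
def mrec : List String → List String → Bool
  | [], [] => true
  | [], _ :: _ => false
  | p :: _, [] => p == "#"
  | p :: ps, t :: ts =>
    if p == "#" then true
    else if p == "+" then mrec ps ts
    else if p != t then false
    else mrec ps ts

theorem loopA_eq_mrec (ps ts : List String) (n i : Nat)
    (hn : n = max ps.length ts.length) :
    topicLoopA ps ts n i = mrec (ps.drop i) (ts.drop i) := by
  fun_induction topicLoopA ps ts n i with
  | case1 i h hp =>
    have hts : i < ts.length := by omega
    rw [List.drop_eq_nil_of_le hp]
    rw [List.drop_eq_getElem_cons hts]
    rfl
  | case2 i h hp ht =>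
    have hps : i < ps.length := by omega
    rw [List.drop_eq_getElem_cons hps, List.drop_eq_nil_of_le ht]
    simp [mrec, List.getD_eq_getElem?_getD, List.getElem?_eq_getElem hps]
  | case3 i h hp ht hsharp =>
    have hps : i < ps.length := by omega
    have hts : i < ts.length := by omega
    rw [List.drop_eq_getElem_cons hps, List.drop_eq_getElem_cons hts]
    simp only [mrec]
    simp_all [List.getD_eq_getElem?_getD, List.getElem?_eq_getElem hps]
  | case4 i h hp ht hsharp hplus ih =>
    have hps : i < ps.length := by omega
    have hts : i < ts.length := by omega
    rw [List.drop_eq_getElem_cons hps, List.drop_eq_getElem_cons hts]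
    simp only [mrec]
    simp_all [List.getD_eq_getElem?_getD, List.getElem?_eq_getElem hps,
      List.getElem?_eq_getElem hts]
  | case5 i h hp ht hsharp hplus hne =>
    have hps : i < ps.length := by omega
    have hts : i < ts.length := by omega
    rw [List.drop_eq_getElem_cons hps, List.drop_eq_getElem_cons hts]
    simp only [mrec]
    simp_all [List.getD_eq_getElem?_getD, List.getElem?_eq_getElem hps,
      List.getElem?_eq_getElem hts]
  | case6 i h hp ht hsharp hplus hne ih =>
    have hps : i < ps.length := by omega
    have hts : i < ts.length := by omega
    rw [List.drop_eq_getElem_cons hps, List.drop_eq_getElem_cons hts]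
    simp only [mrec]
    simp_all [List.getD_eq_getElem?_getD, List.getElem?_eq_getElem hps,
      List.getElem?_eq_getElem hts]
  | case7 i h =>
    have h1 : ps.length ≤ i := by omega
    have h2 : ts.length ≤ i := by omega
    rw [List.drop_eq_nil_of_le h1, List.drop_eq_nil_of_le h2]
    rfl

-- the same reference matcher on the char-list segments
def mrecL : List (List Char) → List (List Char) → Bool
  | [], [] => true
  | [], _ :: _ => false
  | p :: _, [] => p == ['#']
  | p :: ps, t :: ts =>
    if p == ['#'] then true
    else if p == ['+'] then mrecL ps ts
    else if p != t then false
    else mrecL ps ts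

theorem ofList_beq (a b : List Char) : (String.ofList a == String.ofList b) = (a == b) := by
  rw [Bool.eq_iff_iff]; simp [String.ofList_inj]

theorem ofList_beq_lit (a : List Char) (c : Char) (s : String) (hs : s = String.ofList [c]) :
    (String.ofList a == s) = (a == [c]) := by
  rw [hs, ofList_beq]

theorem mrec_map (l m : List (List Char)) :
    mrec (l.map String.ofList) (m.map String.ofList) = mrecL l m := by
  induction l generalizing m with
  | nil => cases m <;> rfl
  | cons p ps ih =>
    cases m with
    | nil =>
      simp only [List.map, mrec, mrecL]
      rw [ofList_beq_lit p '#' "#" (by decide)]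
    | cons t ts =>
      have h1 := ofList_beq_lit p '#' "#" (by decide)
      have h2 := ofList_beq_lit p '+' "+" (by decide)
      have h3 := ofList_beq p t
      simp only [List.map, mrec, mrecL, bne, h1, h2, h3, ih]
      rfl

-- the segments of a char list, as split on '/' produces them
def segs : List Char → List (List Char)
  | [] => [[]]
  | c :: cs =>
    if c = '/' then [] :: segs cs
    else
      match segs cs with
      | [] => [[c]]
      | h :: t => (c :: h) :: t

theorem segs_ne_nil (l : List Char) : segs l ≠ [] := by
  cases l with
  | nil => simp [segs]
  | cons c cs =>
    simp only [segs]
    split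
    · simp
    · split <;> simp

-- prepend a prefix to the first segment
def consFirst (p : List Char) (ss : List (List Char)) : List (List Char) :=
  match ss with
  | [] => [p]
  | h :: t => (p ++ h) :: t

theorem consFirst_nil_left (ss : List (List Char)) (h : ss ≠ []) : consFirst [] ss = ss := by
  cases ss with
  | nil => exact absurd rfl h
  | cons a t => simp [consFirst]

theorem go_eq_segs (fuel : Nat) (l cur : List Char) (acc : List (List Char))
    (hf : l.length < fuel) :
    PySem.Chars.splitOn.go ['/'] fuel l cur acc = acc.reverse ++ consFirst cur.reverse (segs l) := by
  induction fuel generalizing l cur acc with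
  | zero => omega
  | succ fuel ih =>
    cases l with
    | nil =>
      simp [PySem.Chars.splitOn.go, segs, consFirst]
    | cons c rest =>
      rw [PySem.Chars.splitOn.go]
      by_cases hc : c = '/'
      · subst hc
        have hpre : List.isPrefixOf ['/'] ('/' :: rest) = true := by
          simp [List.isPrefixOf]
        rw [if_pos hpre]
        simp only [List.length_cons, List.length_nil, List.drop_succ_cons, List.drop_zero]
        rw [ih rest [] (cur.reverse :: acc) (by simp at hf; omega)]
        rw [List.reverse_nil, consFirst_nil_left _ (segs_ne_nil rest)]
        have hseg : segs ('/' :: rest) = [] :: segs rest := by simp [segs]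
        rw [hseg]
        cases hs : segs rest with
        | nil => exact absurd hs (segs_ne_nil rest)
        | cons h t2 => simp [consFirst]
      · have hpre : List.isPrefixOf ['/'] (c :: rest) = false := by
          simp [List.isPrefixOf]
          intro h; exact absurd h.symm hc
        rw [if_neg (by simp [hpre])]
        rw [ih rest (c :: cur) acc (by simp at hf; omega)]
        simp only [segs, if_neg hc]
        cases hs : segs rest with
        | nil => exact absurd hs (segs_ne_nil rest)
        | cons h t => simp [consFirst]

theorem splitOn_eq_segs (l : List Char) : PySem.Chars.splitOn l ['/'] = segs l := by
  rw [PySem.Chars.splitOn, go_eq_segs _ _ _ _ (by omega)]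
  simpa using consFirst_nil_left _ (segs_ne_nil l)

-- segs through the first '/' boundary
theorem segs_decomp (l : List Char) :
    segs l = l.takeWhile (fun c => !(c == '/')) ::
      (match l.dropWhile (fun c => !(c == '/')) with
       | [] => []
       | _ :: l2 => segs l2) := by
  induction l with
  | nil => simp [segs]
  | cons c cs ih =>
    by_cases hc : c = '/'
    · subst hc; simp [segs, List.takeWhile_cons, List.dropWhile_cons]
    · have hcb : (c == '/') = false := by simp [hc]
      rw [List.takeWhile_cons, List.dropWhile_cons, hcb]
      simp only [Bool.not_false, if_true, if_pos rfl]
      conv_lhs => rw [segs, if_neg hc, ih]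

-- the first segment equals the one-char segment [c] (c ≠ '/') iff Source B's headIsSeg check fires
theorem takeWhile_eq_single (l : List Char) (c : Char) (hc : c ≠ '/') :
    (l.takeWhile (fun c => !(c == '/')) == [c]) = headIsSeg l c := by
  cases l with
  | nil => simp [headIsSeg]
  | cons x xs =>
    rw [List.takeWhile_cons]
    by_cases hx : x = '/'
    · subst hx
      simp [headIsSeg]
      intro h; exact absurd h.symm hc
    · have hxb : (x == '/') = false := by simp [hx]
      rw [hxb]
      simp only [Bool.not_false, if_pos rfl]
      cases xs with
      | nil => rw [Bool.eq_iff_iff]; simp [headIsSeg]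
      | cons y ys =>
        rw [List.takeWhile_cons]
        by_cases hy : y = '/'
        · subst hy
          rw [Bool.eq_iff_iff]; simp [headIsSeg]
        · have hyb : (y == '/') = false := by simp [hy]
          rw [hyb]
          simp only [Bool.not_false, if_pos rfl]
          rw [Bool.eq_iff_iff]
          simp [headIsSeg, hy]

-- what mB false computes: compare the current segments, then hand back to the outer loop
def mAux (p t : List Char) : Bool :=
  (p.takeWhile (fun c => !(c == '/')) == t.takeWhile (fun c => !(c == '/'))) &&
  (match p.dropWhile (fun c => !(c == '/')), t.dropWhile (fun c => !(c == '/')) with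
   | [], [] => true
   | _ :: p2, [] => headIsSeg p2 '#'
   | [], _ :: _ => false
   | _ :: p2, _ :: t2 => mB true p2 t2)

theorem mB_false_eq_mAux (p t : List Char) : mB false p t = mAux p t := by
  induction p generalizing t with
  | nil =>
    cases t with
    | nil => simp [mB.eq_def, mAux]
    | cons tc ts =>
      rw [mB.eq_def]
      by_cases htc : tc = '/'
      · subst htc; simp [mAux, List.takeWhile_cons, List.dropWhile_cons, headIsSeg]
      · simp [mAux, List.takeWhile_cons, List.dropWhile_cons, htc]
  | cons pc ps ih =>
    cases t with
    | nil =>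
      rw [mB.eq_def]
      by_cases hpc : pc = '/'
      · subst hpc; simp [mAux, List.takeWhile_cons, List.dropWhile_cons, headIsSeg]
      · simp [mAux, List.takeWhile_cons, List.dropWhile_cons, hpc, headIsSeg]
    | cons tc ts =>
      rw [mB.eq_def]
      simp only [Bool.false_and, Bool.false_eq_true, if_false]
      by_cases hpc : pc = '/'
      · by_cases htc : tc = '/'
        · subst hpc htc
          simp [mAux, List.takeWhile_cons, List.dropWhile_cons]
        · subst hpc
          simp [mAux, List.takeWhile_cons, List.dropWhile_cons, htc]
          intro h; exact absurd h.symm htc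
      · by_cases htc : tc = '/'
        · subst htc
          simp [mAux, List.takeWhile_cons, List.dropWhile_cons, hpc]
        · by_cases heq : pc = tc
          · subst heq
            rw [if_neg (by simp [hpc]), if_pos (by simp)]
            rw [ih]
            simp [mAux, List.takeWhile_cons, List.dropWhile_cons, hpc]
          · simp [mAux, List.takeWhile_cons, List.dropWhile_cons, hpc, htc, heq]

theorem mB_true_eq_false (p t : List Char) (h1 : headIsSeg p '#' = false)
    (h2 : headIsSeg p '+' = false) : mB true p t = mB false p t := by
  rw [mB.eq_def, mB.eq_def]
  simp [h1, h2]

theorem mrecL_nil_right (h : List Char) (rest : List (List Char)) :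
    mrecL (h :: rest) [] = (h == ['#']) := rfl

theorem mrecL_plus_cons (ps : List (List Char)) (t : List Char) (ts : List (List Char)) :
    mrecL (['+'] :: ps) (t :: ts) = mrecL ps ts := by
  simp [mrecL]

theorem mB_true_eq_mrecL (p t : List Char) : mB true p t = mrecL (segs p) (segs t) := by
  generalize hn : p.length + t.length = n
  induction n using Nat.strong_induction_on generalizing p t with
  | _ n ih =>
  by_cases hsharp : headIsSeg p '#' = true
  · -- '#' segment at the head of the pattern
    have hseg : ∃ ss, segs p = ['#'] :: ss := by
      cases p with
      | nil => simp [headIsSeg] at hsharp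
      | cons x xs =>
        simp only [headIsSeg, Bool.and_eq_true, beq_iff_eq] at hsharp
        obtain ⟨hx, hxs⟩ := hsharp
        subst hx
        rw [segs_decomp]
        rcases Bool.or_eq_true _ _ |>.mp hxs with h | h
        · have : xs = [] := by simpa using h
          subst this
          exact ⟨_, rfl⟩
        · cases xs with
          | nil => exact ⟨_, rfl⟩
          | cons y ys =>
            have hy : y = '/' := by simpa using h
            subst hy
            exact ⟨segs ys, by simp [List.takeWhile_cons, List.dropWhile_cons]⟩
    obtain ⟨ss, hss⟩ := hseg
    rw [mB.eq_def, hss]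
    simp only [hsharp, Bool.and_true, if_pos rfl]
    cases hts : segs t with
    | nil => exact absurd hts (segs_ne_nil t)
    | cons h rest => simp [mrecL]
  · by_cases hplus : headIsSeg p '+' = true
    · -- '+' segment at the head of the pattern
      cases p with
      | nil => simp [headIsSeg] at hplus
      | cons x xs =>
        have hplus' := hplus
        simp only [headIsSeg, Bool.and_eq_true, beq_iff_eq] at hplus'
        obtain ⟨hx, hxs⟩ := hplus'
        subst hx
        rw [mB.eq_def]
        rw [if_neg (by simp [hsharp]), if_pos (by simp [hplus])]
        rcases Bool.or_eq_true _ _ |>.mp hxs with hnil | hslash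
        · -- pattern is exactly "+"
          have : xs = [] := by simpa using hnil
          subst this
          rw [segs_decomp t]
          cases hdt : t.dropWhile (fun c => !(c == '/')) with
          | nil =>
            dsimp only
            rw [show segs ['+'] = [['+']] from rfl, mrecL_plus_cons]
            rfl
          | cons d t2 =>
            dsimp only
            rw [show segs ['+'] = [['+']] from rfl, mrecL_plus_cons]
            cases hst : segs t2 with
            | nil => exact absurd hst (segs_ne_nil t2)
            | cons h r => simp [mrecL, hst]
        · cases xs with
          | nil => simp at hslash
          | cons y ys =>
            have hy : y = '/' := by simpa using hslash
            subst hy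
            -- pattern is "+/" ++ ys
            have hsegp : segs ('+' :: '/' :: ys) = ['+'] :: segs ys := by
              simp [segs]
            rw [hsegp, segs_decomp t]
            cases hdt : t.dropWhile (fun c => !(c == '/')) with
            | nil =>
              dsimp only
              rw [if_pos List.isEmpty_nil, mrecL_plus_cons]
              rw [segs_decomp ys, mrecL_nil_right]
              rw [takeWhile_eq_single ys '#' (by decide)]
            | cons d t2 =>
              dsimp only
              rw [if_neg (by simp : ¬ ((d :: t2).isEmpty = true)), mrecL_plus_cons, List.tail_cons]
              have ht2 : t2.length < t.length := by
                have := List.length_dropWhile_le (fun c => !(c == '/')) t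
                rw [hdt] at this
                simp at this; omega
              exact ih (ys.length + t2.length) (by simp at hn; omega) ys t2 rfl
    · -- literal first segment
      have hplus' : headIsSeg p '+' = false := by simpa using hplus
      have hsharp' : headIsSeg p '#' = false := by simpa using hsharp
      rw [mB_true_eq_false p t hsharp' hplus', mB_false_eq_mAux]
      rw [segs_decomp p, segs_decomp t]
      unfold mAux
      simp only [mrecL]
      rw [takeWhile_eq_single p '#' (by decide), takeWhile_eq_single p '+' (by decide)]
      rw [hsharp', hplus']
      simp only [Bool.false_eq_true, if_false, bne]
      by_cases heq : p.takeWhile (fun c => !(c == '/')) = t.takeWhile (fun c => !(c == '/'))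
      · rw [heq]
        simp only [beq_self_eq_true, Bool.not_true, Bool.true_and,
          Bool.false_eq_true, if_false]
        cases hdp : p.dropWhile (fun c => !(c == '/')) with
        | nil =>
          cases hdt : t.dropWhile (fun c => !(c == '/')) with
          | nil => rfl
          | cons d t2 =>
            show false = mrecL [] (segs t2)
            cases hst : segs t2 with
            | nil => exact absurd hst (segs_ne_nil t2)
            | cons h r => rfl
        | cons d p2 =>
          cases hdt : t.dropWhile (fun c => !(c == '/')) with
          | nil =>
            show headIsSeg p2 '#' = mrecL (segs p2) []
            rw [segs_decomp p2, mrecL_nil_right, takeWhile_eq_single p2 '#' (by decide)]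
          | cons e t2 =>
            show mB true p2 t2 = mrecL (segs p2) (segs t2)
            have hp2 : p2.length < p.length := by
              have := List.length_dropWhile_le (fun c => !(c == '/')) p
              rw [hdp] at this; simp at this; omega
            have ht2 : t2.length < t.length := by
              have := List.length_dropWhile_le (fun c => !(c == '/')) t
              rw [hdt] at this; simp at this; omega
            exact ih (p2.length + t2.length) (by omega) p2 t2 rfl
      · have hb : (p.takeWhile (fun c => !(c == '/')) == t.takeWhile (fun c => !(c == '/'))) = false := by
          simpa using heq
        simp [hb]

-- ===== VERDICT (by name: the statement is the Claim_ definition above) =====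
theorem topic_matches_py_spec : Claim_equal_topic_matches_py := by
  intro pattern topic _
  unfold Spec_topic_matches_py topic_matches_py topic_matches_py_alt
  have hsplit : ∀ s : String,
      (PySem.Str.split? s "/").getD [] = (segs s.toList).map String.ofList := by
    intro s
    rw [← splitOn_eq_segs]
    simp [PySem.Str.split?, PySem.Chars.split?]
  simp only [hsplit]
  rw [loopA_eq_mrec _ _ _ _ rfl]
  simp only [List.drop_zero]
  rw [mrec_map, ← mB_true_eq_mrecL]
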